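-- pv_equiv track=rewrite | github.com/melroy999/2IMC00-SLCO | SLCOtoGPUexplore/python-textx-jinja2/slco2gpuexplore.py | cuda_xor_r_inv
-- ===== SOURCE A (Python) =====
-- def cuda_xor_r_inv(a, nrbits, ic):
-- 	"""Produce CUDA code for the xor_rshft_inv function for 64-bits."""
-- 	result = "node2 = node1;\n" + indentspace(ic)
-- 	i = a
-- 	while True:
-- 		result += "node2 = (node1 ^ rshft(node2, " + str(a) + "));\n" + indentspace(ic)
-- 		if i >= nrbits:
-- 			break
-- 		i += a
-- 	result += "node1 = node2;"
-- 	return result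
--
-- def indentspace(i):
-- 	"""Provide a string consisting of i tabs"""
-- 	result = ""
-- 	for j in range(0,i):
-- 		result += "\t"
-- 	return result
-- ===== SOURCE B (Python) =====
-- def cuda_xor_r_inv(a, nrbits, ic):
--     """Produce CUDA code for the xor_rshft_inv function for 64-bits."""
--     ind = "\t" * ic
--     n = 1 if a >= nrbits else -(-nrbits // a)
--     chunk = "node2 = (node1 ^ rshft(node2, " + str(a) + "));\n" + ind
--     return "node2 = node1;\n" + ind + chunk * n + "node1 = node2;"
-- ===== Notes on version B (the rewrite author's own statement) =====
-- stated objective: faster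
-- what changed: Replaces the do-while string-accumulation loop (and indentspace's tab loop) with a closed-form repetition count N = 1 if a >= nrbits else ceil(nrbits/a) and single string multiplication chunk * N.
import Mathlib
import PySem

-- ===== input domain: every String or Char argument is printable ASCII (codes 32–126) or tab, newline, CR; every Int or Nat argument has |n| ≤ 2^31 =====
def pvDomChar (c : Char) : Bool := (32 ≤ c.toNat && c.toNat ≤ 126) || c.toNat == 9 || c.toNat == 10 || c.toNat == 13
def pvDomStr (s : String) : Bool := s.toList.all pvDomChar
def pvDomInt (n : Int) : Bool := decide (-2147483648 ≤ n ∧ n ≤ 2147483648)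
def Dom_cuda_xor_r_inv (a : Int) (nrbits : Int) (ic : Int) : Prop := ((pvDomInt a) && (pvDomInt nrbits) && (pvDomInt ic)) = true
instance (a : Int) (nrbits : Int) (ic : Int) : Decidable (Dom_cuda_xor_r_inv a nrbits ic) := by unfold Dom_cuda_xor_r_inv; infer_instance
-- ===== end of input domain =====

-- B replaces A's do-while string-accumulation loop by a closed-form repetition count
-- and string multiplication (objective: simpler).

-- ===== PORT A =====
-- indentspace: 'result = ""; for j in range(0, i): result += "\t"'
def indentspaceA (i : Int) : String :=
  (PySem.List.pyRange 0 i 1).foldl (fun r _ => r ++ "\t") ""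

-- the 'while True' loop; the fuel only makes the loop total (under Pre_ it is
-- never exhausted: lemma loopA_closed below)
def loopA (a nrbits ic : Int) : Nat → Int → String → String
  | 0, _, result => result
  | f + 1, i, result =>
    let result := result ++ "node2 = (node1 ^ rshft(node2, " ++ PySem.Int.toStr a ++ "));\n" ++ indentspaceA ic
    if i ≥ nrbits then result
    else loopA a nrbits ic f (i + a) result

def cuda_xor_r_inv (a : Int) (nrbits : Int) (ic : Int) : String :=
  loopA a nrbits ic (nrbits.toNat + 1) a ("node2 = node1;\n" ++ indentspaceA ic) ++ "node1 = node2;"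

-- ===== PORT B =====
def cuda_xor_r_inv_alt (a : Int) (nrbits : Int) (ic : Int) : String :=
  -- ind = "\t" * ic ; n = 1 if a >= nrbits else -(-nrbits // a) ; chunk * n by join/replicate
  "node2 = node1;\n" ++ String.join (List.replicate ic.toNat "\t") ++
    String.join (List.replicate
      (if a ≥ nrbits then (1:Int) else -(PySem.Int.floordiv (-nrbits) a)).toNat
      ("node2 = (node1 ^ rshft(node2, " ++ PySem.Int.toStr a ++ "));\n" ++
        String.join (List.replicate ic.toNat "\t"))) ++ "node1 = node2;"

-- ===== PRECONDITION & SPEC =====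
-- Pre_ excludes exactly the inputs on which A's 'while True' never terminates
-- (a ≤ 0 and a < nrbits: i never reaches nrbits, so A returns no value there).
def Pre_cuda_xor_r_inv (a : Int) (nrbits : Int) (ic : Int) : Prop := 0 < a ∨ nrbits ≤ a
instance (a : Int) (nrbits : Int) (ic : Int) : Decidable (Pre_cuda_xor_r_inv a nrbits ic) := by
  unfold Pre_cuda_xor_r_inv; infer_instance

def pvWitness_cuda_xor_r_inv : Int × Int × Int := (3, 10, 2)

def Spec_cuda_xor_r_inv (a : Int) (nrbits : Int) (ic : Int) (out : String) : Prop := out = cuda_xor_r_inv_alt a nrbits ic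
instance (a : Int) (nrbits : Int) (ic : Int) (out : String) : Decidable (Spec_cuda_xor_r_inv a nrbits ic out) := by unfold Spec_cuda_xor_r_inv; infer_instance

-- ===== CLAIM (what is proved, stated in full; the proofs are below) =====
def Claim_equal_cuda_xor_r_inv : Prop := ∀ (a : Int) (nrbits : Int) (ic : Int), Dom_cuda_xor_r_inv a nrbits ic → Pre_cuda_xor_r_inv a nrbits ic → Spec_cuda_xor_r_inv a nrbits ic (cuda_xor_r_inv a nrbits ic)

-- ===== LEMMAS AND PROOFS =====

-- indentspace(ic) = "\t" * ic
theorem foldl_append_str (l : List String) (s : String) :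
    l.foldl (fun r x => r ++ x) s = s ++ l.foldl (fun r x => r ++ x) "" := by
  induction l generalizing s with
  | nil => simp
  | cons x xs ih =>
    simp only [List.foldl]
    rw [ih (s ++ x), ih ("" ++ x)]
    simp [String.append_assoc]

theorem join_replicate_succ (n : Nat) (s : String) :
    String.join (List.replicate (n + 1) s) = s ++ String.join (List.replicate n s) := by
  simp only [String.join, List.replicate_succ, List.foldl]
  rw [foldl_append_str]
  simp

theorem foldl_tab (l : List Int) (s : String) :
    l.foldl (fun r _ => r ++ "\t") s = s ++ String.join (List.replicate l.length "\t") := by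
  induction l generalizing s with
  | nil => simp [String.join]
  | cons x xs ih => simp [List.foldl, ih, join_replicate_succ, String.append_assoc]

theorem indentspaceA_eq (i : Int) :
    indentspaceA i = String.join (List.replicate i.toNat "\t") := by
  have h := foldl_tab (PySem.List.pyRange 0 i 1) ""
  simpa [indentspaceA, PySem.List.length_pyRange_one] using h

-- the iteration count of A's loop, started at i
def cntA (a nrbits : Int) (i : Int) : Nat :=
  if nrbits ≤ i then 1 else ((nrbits - i - 1) / a).toNat + 2

theorem cntA_step (a nrbits i : Int) (_ha : 0 < a) (hi : ¬ nrbits ≤ i) :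
    cntA a nrbits i = cntA a nrbits (i + a) + 1 := by
  unfold cntA
  by_cases h2 : nrbits ≤ i + a
  · have h0 : (0:Int) ≤ nrbits - i - 1 := by omega
    have hlt : nrbits - i - 1 < a := by omega
    simp [hi, h2, Int.ediv_eq_zero_of_lt h0 hlt]
  · have key : (nrbits - i - 1) / a = (nrbits - (i + a) - 1) / a + 1 := by
      have := Int.add_mul_ediv_right (nrbits - (i + a) - 1) 1 (show a ≠ 0 by omega)
      have heq : nrbits - i - 1 = nrbits - (i + a) - 1 + 1 * a := by ring
      rw [heq, this]
    have hn1 : (0:Int) ≤ (nrbits - (i + a) - 1) / a := Int.ediv_nonneg (by omega) (by omega)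
    simp only [hi, h2, if_false, key]
    omega

theorem loopA_succ (a nrbits ic : Int) (f : Nat) (i : Int) (acc : String) :
    loopA a nrbits ic (f + 1) i acc =
      (if nrbits ≤ i
        then acc ++ "node2 = (node1 ^ rshft(node2, " ++ PySem.Int.toStr a ++ "));\n" ++ indentspaceA ic
        else loopA a nrbits ic f (i + a)
          (acc ++ "node2 = (node1 ^ rshft(node2, " ++ PySem.Int.toStr a ++ "));\n" ++ indentspaceA ic)) := by
  rfl

theorem loopA_closed (a nrbits ic : Int) (ha : 0 < a ∨ nrbits ≤ a) :
    ∀ (f : Nat) (i : Int) (acc : String),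
      (0 < a ∨ nrbits ≤ i) →
      cntA a nrbits i ≤ f + 1 →
      loopA a nrbits ic (f + 1) i acc =
        acc ++ String.join (List.replicate (cntA a nrbits i)
          ("node2 = (node1 ^ rshft(node2, " ++ PySem.Int.toStr a ++ "));\n" ++ indentspaceA ic)) := by
  intro f
  induction f with
  | zero =>
    intro i acc hpre hf
    by_cases hi : nrbits ≤ i
    · rw [loopA_succ, if_pos hi]
      simp [cntA, hi, String.join, String.append_assoc]
    · exfalso; simp [cntA, hi] at hf
  | succ f ih =>
    intro i acc hpre hf
    by_cases hi : nrbits ≤ i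
    · rw [loopA_succ, if_pos hi]
      simp [cntA, hi, String.join, String.append_assoc]
    · have ha' : 0 < a := by
        cases hpre with
        | inl h => exact h
        | inr h => exact absurd h hi
      have hstep := cntA_step a nrbits i ha' hi
      have hrec := ih (i + a)
        (acc ++ "node2 = (node1 ^ rshft(node2, " ++ PySem.Int.toStr a ++ "));\n" ++ indentspaceA ic)
        (Or.inl ha') (by omega)
      rw [loopA_succ, if_neg hi, hrec, hstep, join_replicate_succ]
      simp [String.append_assoc]

-- the closed-form count of B equals A's iteration count
theorem count_eq (a nrbits : Int) (hpre : 0 < a ∨ nrbits ≤ a) :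
    (if a ≥ nrbits then (1:Int) else -(PySem.Int.floordiv (-nrbits) a)).toNat
      = cntA a nrbits a := by
  by_cases h : nrbits ≤ a
  · simp [h, cntA]
  · have ha : 0 < a := by
      cases hpre with
      | inl h' => exact h'
      | inr h' => exact absurd h' h
    have hfd : PySem.Int.floordiv (-nrbits) a = (-nrbits) / a :=
      PySem.Int.floordiv_eq_ediv_of_pos ha
    have hq0 : (0:Int) ≤ (nrbits - a - 1) / a := Int.ediv_nonneg (by omega) (by omega)
    have hceil : -((-nrbits) / a) = (nrbits - a - 1) / a + 2 := by
      have hdm := Int.mul_ediv_add_emod (nrbits - a - 1) a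
      have hm0 : 0 ≤ (nrbits - a - 1) % a := Int.emod_nonneg _ (by omega)
      have hma : (nrbits - a - 1) % a < a := Int.emod_lt_of_pos _ ha
      have := (PySem.Int.neg_floordiv_neg_eq_iff_of_pos (a := nrbits) (b := a)
        (q := (nrbits - a - 1) / a + 2) ha).mpr (by constructor <;> nlinarith)
      rw [hfd] at this; exact this
    simp only [ge_iff_le, h, if_false, hfd, hceil, cntA]
    omega

-- ===== VERDICT (by name: the statement is the Claim_ definition above) =====
theorem cuda_xor_r_inv_spec : Claim_equal_cuda_xor_r_inv := by
  intro a nrbits ic _ hpre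
  unfold Spec_cuda_xor_r_inv cuda_xor_r_inv cuda_xor_r_inv_alt
  have hfuel : cntA a nrbits a ≤ nrbits.toNat + 1 := by
    unfold cntA
    by_cases h : nrbits ≤ a
    · simp [h]
    · have ha : 0 < a := by
        cases hpre with
        | inl h' => exact h'
        | inr h' => exact absurd h' h
      have h1 : (nrbits - a - 1) / a ≤ nrbits - a - 1 := Int.ediv_le_self _ (by omega)
      simp only [h, if_false]
      omega
  have hpre' : 0 < a ∨ nrbits ≤ a := hpre
  rw [loopA_closed a nrbits ic hpre' nrbits.toNat a _ hpre' hfuel]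
  rw [← count_eq a nrbits hpre']
  simp [indentspaceA_eq, String.append_assoc]
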